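-- pv_equiv track=rewrite | github.com/YnezT0311/project_dataset_usage_inference | text_code/utils/data_process.py | get_book_label_mapping
-- ===== SOURCE A (Python) =====
-- def get_book_label_mapping(dataset):
--     # Create a dictionary to hold book_id and their label
--     book_labels = {}
--     for entry in dataset:
--         book_id = entry['book_id']
--         label = entry['label']
--         if book_id not in book_labels:
--             book_labels[book_id] = label
--     # sort
--     book_labels = {k: v for k, v in sorted(book_labels.items(), key=lambda item: item[0])}
--
--     # get the label to id mapping label:[]
--     label_to_id = {}
--     for book_id, label in book_labels.items():
--         if label not in label_to_id:
--             label_to_id[label] = []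
--         label_to_id[label].append(book_id)
--     # sort
--     for label, book_id in label_to_id.items():
--         label_to_id[label] = sorted(book_id)
--
--     return book_labels, label_to_id
-- ===== SOURCE B (Python) =====
-- def get_book_label_mapping(dataset):
--     # sort the distinct book_ids once, then look up each id's first label directly;
--     # group by deduped labels with one filtration per label (no dict-of-lists, no per-group sort)
--     ids = sorted(set(e['book_id'] for e in dataset))
--     book_labels = {bid: next(e['label'] for e in dataset if e['book_id'] == bid)
--                    for bid in ids}
--     labels = list(dict.fromkeys(book_labels.values()))
--     label_to_id = {lab: [b for b, v in book_labels.items() if v == lab] for lab in labels}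
--     return book_labels, label_to_id
-- ===== Notes on version B (the rewrite author's own statement) =====
-- stated objective: alternative
-- what changed: B never builds A's dicts by accumulation: it sorts the distinct book_ids once, looks up each id's first label by a direct scan, and builds the label grouping by deduping the labels of the id-sorted pairs and emitting one filtration pass per label, so A's guarded-insert dict, dict-of-lists append loop and per-group re-sort all disappear.
import Mathlib
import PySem

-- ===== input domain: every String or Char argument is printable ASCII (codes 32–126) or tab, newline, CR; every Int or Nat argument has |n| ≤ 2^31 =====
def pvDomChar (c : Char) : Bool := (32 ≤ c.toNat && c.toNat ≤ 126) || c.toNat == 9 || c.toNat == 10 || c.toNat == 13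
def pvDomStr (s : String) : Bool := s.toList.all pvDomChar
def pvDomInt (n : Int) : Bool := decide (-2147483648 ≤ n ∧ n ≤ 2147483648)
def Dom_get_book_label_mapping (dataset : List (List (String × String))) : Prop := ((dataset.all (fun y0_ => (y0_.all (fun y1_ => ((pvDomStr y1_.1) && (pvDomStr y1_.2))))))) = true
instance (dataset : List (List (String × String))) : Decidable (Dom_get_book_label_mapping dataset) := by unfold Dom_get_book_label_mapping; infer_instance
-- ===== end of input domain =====

-- B drops A's dict accumulations entirely: it sorts the distinct book_ids, finds each
-- id's first label by a direct scan, and groups by deduped labels with one filtration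
-- pass per label; objective: alternative.

-- ===== PORT A =====
def get_book_label_mapping (dataset : List (List (String × String))) :
    (List (String × String)) × (List (String × List String)) :=
  -- book_labels = {}; for entry: if entry['book_id'] not in book_labels: book_labels[...] = entry['label']
  let book_labels : PySem.Dict String String :=
    dataset.foldl (fun d entry =>
      let book_id := ((PySem.Dict.mk entry).get? "book_id").getD ""
      let label := ((PySem.Dict.mk entry).get? "label").getD ""
      if d.contains book_id then d else d.insert book_id label) PySem.Dict.empty
  -- book_labels = {k: v for k, v in sorted(book_labels.items(), key=lambda item: item[0])}
  let book_labels2 : PySem.Dict String String :=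
    (PySem.List.sorted book_labels.items (fun item => item.1)).foldl
      (fun d kv => d.insert kv.1 kv.2) PySem.Dict.empty
  -- for book_id, label in book_labels.items(): label_to_id.setdefault(label, []).append(book_id)
  let label_to_id : PySem.Dict String (List String) :=
    book_labels2.items.foldl (fun d p =>
      let d1 := if d.contains p.2 then d else d.insert p.2 ([] : List String)
      d1.modify p.2 [] (fun xs => xs ++ [p.1])) PySem.Dict.empty
  -- for label, book_id in label_to_id.items(): label_to_id[label] = sorted(book_id)
  let label_to_id2 : PySem.Dict String (List String) :=
    label_to_id.items.foldl
      (fun d p => d.insert p.1 (PySem.List.sorted p.2 (fun x => x))) label_to_id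
  (book_labels2.items, label_to_id2.items)

-- ===== PORT B =====
def get_book_label_mapping_alt (dataset : List (List (String × String))) :
    (List (String × String)) × (List (String × List String)) :=
  -- ids = sorted(set(e['book_id'] for e in dataset))
  let ids : List String :=
    PySem.List.sorted
      (PySem.Set.ofList (dataset.map (fun e => ((PySem.Dict.mk e).get? "book_id").getD "")))
      (fun x => x)
  -- book_labels = {bid: next(e['label'] for e in dataset if e['book_id'] == bid) for bid in ids}
  let book_labels : List (String × String) :=
    ids.map (fun bid =>
      (bid, ((dataset.find? (fun e => ((PySem.Dict.mk e).get? "book_id").getD "" == bid)).map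
              (fun e => ((PySem.Dict.mk e).get? "label").getD "")).getD ""))
  -- labels = list(dict.fromkeys(book_labels.values()))
  let labels : List String := PySem.List.dedup (book_labels.map (fun p => p.2))
  -- label_to_id = {lab: [b for b, v in book_labels.items() if v == lab] for lab in labels}
  let label_to_id : List (String × List String) :=
    labels.map (fun lab =>
      (lab, (book_labels.filter (fun p => p.2 == lab)).map (fun p => p.1)))
  (book_labels, label_to_id)

-- ===== PRECONDITION & SPEC =====
-- Pre_ excludes exactly the inputs where Python raises KeyError: an entry missing the
-- key 'book_id' or the key 'label'.
def Pre_get_book_label_mapping (dataset : List (List (String × String))) : Prop :=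
  ∀ entry ∈ dataset, "book_id" ∈ entry.map (fun p => p.1) ∧ "label" ∈ entry.map (fun p => p.1)
instance (dataset : List (List (String × String))) : Decidable (Pre_get_book_label_mapping dataset) := by unfold Pre_get_book_label_mapping; infer_instance
def pvWitness_get_book_label_mapping : (List (List (String × String))) :=
  [[("book_id", "b1"), ("label", "x")], [("book_id", "a0"), ("label", "y")]]
def Spec_get_book_label_mapping (dataset : List (List (String × String))) (out : (List (String × String)) × (List (String × List String))) : Prop := out = get_book_label_mapping_alt dataset
instance (dataset : List (List (String × String))) (out : (List (String × String)) × (List (String × List String))) : Decidable (Spec_get_book_label_mapping dataset out) := by unfold Spec_get_book_label_mapping; infer_instance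

-- ===== CLAIM (what is proved, stated in full; the proofs are below) =====
def Claim_equal_get_book_label_mapping : Prop := ∀ (dataset : List (List (String × String))), Dom_get_book_label_mapping dataset → Pre_get_book_label_mapping dataset → Spec_get_book_label_mapping dataset (get_book_label_mapping dataset)

-- ===== LEMMAS AND PROOFS =====

-- keys of A's guarded first loop: the old keys updated with the ids, in order
theorem pv_guard_keys {β : Type} (l : List β) (k v : β → String) :
    ∀ (d : PySem.Dict String String),
      (l.foldl (fun d x => if d.contains (k x) then d else d.insert (k x) (v x)) d).keys
        = PySem.Set.update d.keys (l.map k) := by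
  induction l with
  | nil => intro d; rfl
  | cons x t ih =>
      intro d
      simp only [List.foldl_cons, List.map_cons, PySem.Set.update, List.foldl_cons]
      by_cases hc : d.contains (k x) = true
      · have hm : k x ∈ d.keys := (PySem.Dict.contains_iff_mem_keys d (k x)).mp hc
        have hadd : PySem.Set.add d.keys (k x) = d.keys := by
          simp [PySem.Set.add, PySem.Set.contains, hm]
        rw [hadd] at *
        simpa [hc] using ih d
      · have hcf : d.contains (k x) = false := by simpa using hc
        have hm : k x ∉ d.keys := fun h => hc ((PySem.Dict.contains_iff_mem_keys d (k x)).mpr h)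
        have hadd : PySem.Set.add d.keys (k x) = d.keys ++ [k x] := by
          simp [PySem.Set.add, PySem.Set.contains, hm]
        rw [hadd]
        have := ih (d.insert (k x) (v x))
        rw [PySem.Dict.keys_insert_of_not_contains d (v x) hcf] at this
        simpa [hc] using this

-- lookup through A's guarded first loop: the old value, else the first matching entry
theorem pv_guard_get? {β : Type} (l : List β) (k v : β → String) :
    ∀ (d : PySem.Dict String String) (key : String),
      (l.foldl (fun d x => if d.contains (k x) then d else d.insert (k x) (v x)) d).get? key
        = (d.get? key).or ((l.find? (fun x => k x == key)).map v) := by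
  induction l with
  | nil => intro d key; cases h : d.get? key <;> simp [h]
  | cons x t ih =>
      intro d key
      simp only [List.foldl_cons]
      by_cases hc : d.contains (k x) = true
      · rw [if_pos hc, ih d key]
        by_cases hk : k x = key
        · subst hk
          have : (d.get? (k x)).isSome := by
            rw [← PySem.Dict.contains_eq_isSome_get?]; exact hc
          obtain ⟨w, hw⟩ := Option.isSome_iff_exists.mp this
          rw [hw]; simp
        · have hb : (k x == key) = false := by simpa using hk
          rw [List.find?_cons, hb]
      · rw [if_neg hc, ih _ key]
        have hcf : d.contains (k x) = false := by simpa using hc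
        by_cases hk : k x = key
        · subst hk
          have hn : d.get? (k x) = none := by
            rw [PySem.Dict.get?_eq_none_iff_contains, hcf]
          rw [PySem.Dict.get?_insert_self, List.find?_cons]
          simp [hn]
        · rw [PySem.Dict.get?_insert_of_ne d (v x) (Ne.symm hk), List.find?_cons]
          have hb : (k x == key) = false := by simpa using hk
          rw [hb]

-- A's "setdefault-then-append" body is a single modify
theorem pv_step_eq_modify (d : PySem.Dict String (List String)) (lab bid : String) :
    (if d.contains lab then d else d.insert lab ([] : List String)).modify lab []
      (fun xs => xs ++ [bid]) = d.modify lab [] (fun xs => xs ++ [bid]) := by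
  by_cases hc : d.contains lab = true
  · simp [hc]
  · have hcf : d.contains lab = false := by simpa using hc
    simp [hc, PySem.Dict.modify, PySem.Dict.getD_insert_self,
      PySem.Dict.insert_insert_self, PySem.Dict.getD_of_not_contains d _ hcf]

-- lookup through a loop of inserts keyed by the (Nodup) first components
theorem pv_get?_insert_loop {ν : Type} (f : ν → ν) :
    ∀ (l : List (String × ν)) (d0 : PySem.Dict String ν) (k : String),
      (l.map (fun p => p.1)).Nodup →
      (l.foldl (fun d p => d.insert p.1 (f p.2)) d0).get? k =
        match l.find? (fun p => p.1 == k) with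
        | some p => some (f p.2)
        | none => d0.get? k := by
  intro l
  induction l with
  | nil => intro d0 k _; rfl
  | cons p t ih =>
      intro d0 k hnd
      simp only [List.map_cons, List.nodup_cons] at hnd
      simp only [List.foldl_cons]
      rw [ih _ k hnd.2]
      by_cases hk : p.1 = k
      · subst hk
        have hfind : t.find? (fun q => q.1 == p.1) = none := by
          rw [List.find?_eq_none]
          intro q hq
          simp only [beq_iff_eq]
          intro h
          exact hnd.1 (h ▸ List.mem_map_of_mem hq)
        rw [hfind]
        simp [PySem.Dict.get?_insert_self]
      · have hbk : (p.1 == k) = false := by simpa using hk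
        rw [List.find?_cons, hbk]
        cases hft : t.find? (fun q => q.1 == k) with
        | some q => simp
        | none => simp [PySem.Dict.get?_insert_of_ne d0 _ (Ne.symm hk)]

theorem pv_find?_eq_self : ∀ (l : List String) (k : String), k ∈ l →
    l.find? (fun x => x == k) = some k := by
  intro l
  induction l with
  | nil => intro k hk; cases hk
  | cons x t ih =>
      intro k hk
      by_cases hx : x = k
      · subst hx; simp
      · have hbx : (x == k) = false := by simpa using hx
        rw [List.find?_cons, hbx]
        have : k ∈ t := by
          rcases List.mem_cons.mp hk with h | h
          · exact absurd h.symm hx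
          · exact h
        exact ih k this

theorem pv_set_update_of_forall_mem : ∀ (xs s : List String), (∀ x ∈ xs, x ∈ s) →
    PySem.Set.update s xs = s := by
  intro xs
  induction xs with
  | nil => intro s _; rfl
  | cons x t ih =>
      intro s h
      have hadd : PySem.Set.add s x = s := by
        have hx : x ∈ s := h x List.mem_cons_self
        simp [PySem.Set.add, PySem.Set.contains, hx]
      simp only [PySem.Set.update, List.foldl_cons, hadd]
      exact ih s (fun y hy => h y (List.mem_cons_of_mem x hy))

-- the heart of the second component: on a key-sorted items list l, A's
-- grouping-then-sorting equals B's dedup-then-filter mapping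
theorem pv_second_eq (l : List (String × String))
    (hp : l.Pairwise (fun a b => a.1 ≤ b.1)) :
    ((l.foldl (fun d p =>
        let d1 := if d.contains p.2 then d else d.insert p.2 ([] : List String)
        d1.modify p.2 [] (fun xs => xs ++ [p.1])) PySem.Dict.empty).items.foldl
          (fun d p => d.insert p.1 (PySem.List.sorted p.2 (fun x => x)))
          (l.foldl (fun d p =>
            let d1 := if d.contains p.2 then d else d.insert p.2 ([] : List String)
            d1.modify p.2 [] (fun xs => xs ++ [p.1])) PySem.Dict.empty)).items
    =
    (PySem.List.dedup (l.map (fun p => p.2))).map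
        (fun lab => (lab, (l.filter (fun p => p.2 == lab)).map (fun p => p.1))) := by
  have e1 : (l.foldl (fun d p =>
        let d1 := if d.contains p.2 then d else d.insert p.2 ([] : List String)
        d1.modify p.2 [] (fun xs => xs ++ [p.1])) PySem.Dict.empty)
      = l.foldl (fun d p => d.modify p.2 [] (fun xs => xs ++ [p.1])) PySem.Dict.empty := by
    simp only [pv_step_eq_modify]
  rw [e1]
  set dA := l.foldl (fun d p => d.modify p.2 [] (fun xs => xs ++ [p.1])) PySem.Dict.empty with hdA
  have e2 : ∀ c, dA.getD c [] = (l.filter (fun p => p.2 == c)).map (fun p => p.1) := by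
    intro c
    have hswap : dA = (l.map Prod.swap).foldl
        (fun d p => d.modify p.1 [] (fun xs => xs ++ [p.2])) PySem.Dict.empty := by
      rw [List.foldl_map]; rfl
    rw [hswap, PySem.Dict.getD_foldl_modify_append]
    simp only [List.filter_map, List.map_map, PySem.Dict.getD_empty, List.nil_append]
    apply List.map_congr_left
    intro p _
    rfl
  have e3 : dA.keys = PySem.List.dedup (l.map (fun p => p.2)) := by
    rw [hdA, PySem.Dict.keys_foldl_modify_key l (fun p => p.2) []
      (fun _ p => fun xs => xs ++ [p.1]) PySem.Dict.empty, PySem.Dict.keys_empty,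
      PySem.List.dedup_eq_ofList]
    rfl
  have e4 : dA.keys.Nodup := by rw [e3]; exact PySem.List.nodup_dedup _
  have e5 : dA.items = (PySem.List.dedup (l.map (fun p => p.2))).map
      (fun k => (k, (l.filter (fun p => p.2 == k)).map (fun p => p.1))) := by
    rw [PySem.Dict.items_eq_map_keys dA e4 ([] : List String), e3]
    exact List.map_congr_left (fun k _ => by rw [e2 k])
  set F := dA.items.foldl (fun d p => d.insert p.1 (PySem.List.sorted p.2 (fun x => x))) dA with hF
  have e6 : F.keys = dA.keys := by
    rw [hF, PySem.Dict.keys_foldl_insert_key dA.items (fun p => p.1)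
      (fun _ p => PySem.List.sorted p.2 (fun x => x)) dA]
    exact pv_set_update_of_forall_mem dA.keys dA.keys (fun x hx => hx)
  have e7 : F.keys.Nodup := by rw [e6]; exact e4
  have hget : ∀ k ∈ dA.keys, F.get? k = some (PySem.List.sorted
      ((l.filter (fun p => p.2 == k)).map (fun p => p.1)) (fun x => x)) := by
    intro k hk
    rw [hF, pv_get?_insert_loop (fun v => PySem.List.sorted v (fun x => x)) dA.items dA k e4]
    have hfind : dA.items.find? (fun p => p.1 == k)
        = some (k, (l.filter (fun p => p.2 == k)).map (fun p => p.1)) := by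
      rw [e5, List.find?_map]
      rw [e3] at hk
      have : ((PySem.List.dedup (l.map (fun p => p.2))).find?
          ((fun p => p.1 == k) ∘ (fun k' => (k', (l.filter (fun p => p.2 == k')).map (fun p => p.1)))))
          = some k := pv_find?_eq_self _ k hk
      rw [this]
      rfl
    rw [hfind]
  have e9 : F.items = (PySem.List.dedup (l.map (fun p => p.2))).map
      (fun k => (k, PySem.List.sorted ((l.filter (fun p => p.2 == k)).map (fun p => p.1)) (fun x => x))) := by
    rw [PySem.Dict.items_eq_map_keys F e7 ([] : List String), e6, e3]
    apply List.map_congr_left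
    intro k hk
    rw [e3] at hget
    rw [PySem.Dict.getD_of_get?_eq_some F ([] : List String) (hget k hk)]
  rw [e9]
  apply List.map_congr_left
  intro k _
  have hpw : ((l.filter (fun p => p.2 == k)).map (fun p => p.1)).Pairwise (· ≤ ·) :=
    List.Pairwise.map _ (fun a b h => h) (List.Pairwise.sublist List.filter_sublist hp)
  rw [PySem.List.sorted_eq_self_of_pairwise _ _ hpw]

-- ===== VERDICT (by name: the statement is the Claim_ definition above) =====
theorem get_book_label_mapping_spec : Claim_equal_get_book_label_mapping := by
  intro dataset _ _
  unfold Spec_get_book_label_mapping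
  unfold get_book_label_mapping get_book_label_mapping_alt
  set gid := fun (e : List (String × String)) => ((PySem.Dict.mk e).get? "book_id").getD "" with hgid
  set glab := fun (e : List (String × String)) => ((PySem.Dict.mk e).get? "label").getD "" with hglab
  set S : List String := PySem.Set.ofList (dataset.map gid) with hS
  set f : String → String × String := fun bid =>
    (bid, ((dataset.find? (fun e => gid e == bid)).map glab).getD "") with hf
  set bl1 : PySem.Dict String String :=
    dataset.foldl (fun d entry =>
      let book_id := ((PySem.Dict.mk entry).get? "book_id").getD ""
      let label := ((PySem.Dict.mk entry).get? "label").getD ""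
      if d.contains book_id then d else d.insert book_id label) PySem.Dict.empty with hbl1
  set bl2 : PySem.Dict String String :=
    (PySem.List.sorted bl1.items (fun item => item.1)).foldl
      (fun d kv => d.insert kv.1 kv.2) PySem.Dict.empty with hbl2
  -- bl1 characterised: keys, lookups, items
  have hkeys : bl1.keys = S := by
    rw [hbl1]
    have := pv_guard_keys dataset gid glab PySem.Dict.empty
    rw [PySem.Dict.keys_empty] at this
    exact this
  have hnd1 : bl1.keys.Nodup := by rw [hkeys, hS]; exact PySem.Set.nodup_ofList _
  have hitems1 : bl1.items = S.map f := by
    rw [PySem.Dict.items_eq_map_keys bl1 hnd1 "", hkeys]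
    apply List.map_congr_left
    intro bid _
    have hg := pv_guard_get? dataset gid glab PySem.Dict.empty bid
    rw [PySem.Dict.get?_empty] at hg
    rw [hf, PySem.Dict.getD_eq_get?_getD]
    rw [hbl1] at *
    rw [hg]
    simp [Option.getD]
  -- bl2.items = sorted items = map f over the sorted ids (= B's book_labels)
  have hnds : ((PySem.List.sorted bl1.items (fun item => item.1)).map (fun p => p.1)).Nodup := by
    have hperm : (PySem.List.sorted bl1.items (fun item => item.1)).Perm bl1.items :=
      PySem.List.sorted_perm _ _ _
    have hnd1' : (bl1.items.map (fun p => p.1)).Nodup := hnd1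
    exact ((hperm.map (fun p => p.1)).nodup_iff).mpr hnd1'
  have hitems2 : bl2.items = PySem.List.sorted bl1.items (fun item => item.1) := by
    rw [hbl2]
    have := PySem.Dict.items_foldl_insert_fresh (PySem.List.sorted bl1.items (fun item => item.1))
      (fun p => p.1) (fun p => p.2) PySem.Dict.empty
      (fun a _ => PySem.Dict.contains_empty a.1) hnds
    simpa using this
  have hbooks : bl2.items = (PySem.List.sorted S (fun x => x)).map f := by
    rw [hitems2, hitems1]
    apply PySem.List.sorted_eq_of_perm_of_pairwise_lt
    · exact (PySem.List.sorted_perm S (fun x => x) false).map f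
    · have hlt : (PySem.List.sorted S (fun x => x)).Pairwise (· < ·) := by
        rw [hS]
        exact PySem.List.sorted_ofList_pairwise_lt _
      rw [List.pairwise_map]
      exact hlt.imp (fun h => h)
  have hp : bl2.items.Pairwise (fun a b => a.1 ≤ b.1) := by
    rw [hitems2]
    exact PySem.List.sorted_pairwise _ _
  have hsec := pv_second_eq bl2.items hp
  refine Prod.ext hbooks ?_
  change (List.foldl (fun d p => d.insert p.1 (PySem.List.sorted p.2 fun x => x))
      (List.foldl (fun d p =>
          (if d.contains p.2 = true then d else d.insert p.2 ([] : List String)).modify p.2 []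
            fun xs => xs ++ [p.1]) PySem.Dict.empty bl2.items)
      (List.foldl (fun d p =>
          (if d.contains p.2 = true then d else d.insert p.2 ([] : List String)).modify p.2 []
            fun xs => xs ++ [p.1]) PySem.Dict.empty bl2.items).items).items
    = List.map (fun lab => (lab, List.map (fun p => p.1)
        (List.filter (fun p => p.2 == lab) (List.map f (PySem.List.sorted S fun x => x)))))
        (PySem.List.dedup (List.map (fun p => p.2) (List.map f (PySem.List.sorted S fun x => x))))
  rw [← hbooks]
  exact hsec
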